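-- pv_equiv track=rewrite | github.com/ZulqurnainCheema/Article-generator-script | run.py | iter_optional_and_static_inputs
-- ===== SOURCE A (Python) =====
-- from typing import Any, Dict, List, Optional
--
-- def is_empty(value: Optional[str]) -> bool:
--     return value is None or str(value).strip() == ""
--
-- def iter_optional_and_static_inputs(step: Dict[str, Any], row: Dict[str, str]):
--     optional_cfg = step.get("inputs_from_csv", {})
--     static_cfg = step.get("inputs_static", {})
--     processed: set[str] = set()
--
--     for selector in optional_cfg:
--         if selector in processed:
--             continue
--         column = optional_cfg[selector]
--         value = row.get(column, "")
--         if not is_empty(value):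
--             processed.add(selector)
--             yield selector, value, f"{column} -> {value}"
--             continue
--         if selector in static_cfg:
--             processed.add(selector)
--             yield selector, static_cfg[selector], "[static]"
--
--     for selector, value in static_cfg.items():
--         if selector in processed or selector in optional_cfg:
--             continue
--         yield selector, value, "[static]"
-- ===== SOURCE B (Python) =====
-- def iter_optional_and_static_inputs(step, row):
--     optional_cfg = step.get("inputs_from_csv", {})
--     static_cfg = step.get("inputs_static", {})
--     # Overlay merge: ordered placeholders for the optional selectors, static
--     # entries layered on top (appending the static-only ones), CSV-derived
--     # entries layered last.  Unfilled placeholders are dropped at the end.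
--     merged = dict.fromkeys(optional_cfg)
--     merged.update({s: (v, "[static]") for s, v in static_cfg.items()})
--     merged.update({s: (v, f"{c} -> {v}")
--                    for s, c in optional_cfg.items()
--                    if (v := row.get(c, "")).strip()})
--     for selector, entry in merged.items():
--         if entry is not None:
--             value, note = entry
--             yield selector, value, note
-- ===== Notes on version B (the rewrite author's own statement) =====
-- stated objective: alternative
-- what changed: B replaces A's two conditional-yield passes with a `processed` set by a declarative dict-overlay merge: ordered None placeholders for the optional selectors, the static entries layered on top (static-only keys appending), the non-empty CSV entries layered last, then one unconditional emit of the filled entries; the static fallback and the skip of empty-and-not-static selectors come for free from the overlay instead of from branch logic.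
import Mathlib
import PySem

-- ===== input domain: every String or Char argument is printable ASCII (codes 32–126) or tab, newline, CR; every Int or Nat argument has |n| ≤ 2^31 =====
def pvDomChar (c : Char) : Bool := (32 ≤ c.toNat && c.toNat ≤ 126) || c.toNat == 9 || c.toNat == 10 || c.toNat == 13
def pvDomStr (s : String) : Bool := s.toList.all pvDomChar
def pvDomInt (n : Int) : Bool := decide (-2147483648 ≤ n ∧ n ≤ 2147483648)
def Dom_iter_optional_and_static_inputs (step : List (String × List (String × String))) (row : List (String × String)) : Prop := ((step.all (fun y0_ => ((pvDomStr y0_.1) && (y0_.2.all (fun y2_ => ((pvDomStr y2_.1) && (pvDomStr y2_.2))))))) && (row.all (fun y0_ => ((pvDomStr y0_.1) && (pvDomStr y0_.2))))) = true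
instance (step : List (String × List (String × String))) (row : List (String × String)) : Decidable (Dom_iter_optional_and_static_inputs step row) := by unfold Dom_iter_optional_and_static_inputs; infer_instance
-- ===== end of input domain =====

-- B replaces A's two conditional-yield passes with their `processed` set by a declarative
-- dict-overlay merge (placeholders, then static layer, then CSV layer, then one emit pass);
-- objective: alternative, same cost.
-- dict arguments are modelled as assoc lists: lookup = first match (PySem.Dict.mk); iterating a
-- dict's keys/items is modelled by first-occurrence key dedup (PySem.List.dedup), exact for the
-- dict such an assoc list denotes.

-- ===== PORT A =====
-- A's helper `is_empty`, on the (always-str) values A passes to it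
def pvIsEmptyA (value : String) : Bool := PySem.Str.strip value == ""

-- `.items()` of the dict an assoc list denotes: first binding per key, first-occurrence order
-- (modelling helper shared by both ports: A's second loop and B's comprehensions iterate dict items)
def pvDictItems (l : List (String × String)) : List (String × String) :=
  (PySem.List.dedup (l.map (·.1))).map (fun k => (k, (PySem.Dict.mk l).getD k ""))

-- A's second loop: `for selector, value in static_cfg.items(): ...`
def pvStaticLoopA (ocfg : List (String × String)) (items : List (String × String))
    (processed : PySem.Set String) : List (String × String × String) :=
  match items with
  | [] => []
  | (selector, value) :: rest =>
    if PySem.Set.contains processed selector || (PySem.Dict.mk ocfg).contains selector then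
      pvStaticLoopA ocfg rest processed
    else
      (selector, value, "[static]") :: pvStaticLoopA ocfg rest processed

-- A's first loop: `for selector in optional_cfg: ...`, carrying `processed`; when the optional
-- selectors are exhausted it falls through into the second loop
def pvOptLoopA (ocfg scfg row : List (String × String)) (pend : List (String × String))
    (processed : PySem.Set String) : List (String × String × String) :=
  match pend with
  | [] => pvStaticLoopA ocfg (pvDictItems scfg) processed
  | p :: rest =>
    let selector := p.1
    if PySem.Set.contains processed selector then
      pvOptLoopA ocfg scfg row rest processed
    else
      let column := (PySem.Dict.mk ocfg).getD selector ""
      let value := (PySem.Dict.mk row).getD column ""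
      if !(pvIsEmptyA value) then
        (selector, value, column ++ " -> " ++ value) ::
          pvOptLoopA ocfg scfg row rest (PySem.Set.add processed selector)
      else if (PySem.Dict.mk scfg).contains selector then
        (selector, (PySem.Dict.mk scfg).getD selector "", "[static]") ::
          pvOptLoopA ocfg scfg row rest (PySem.Set.add processed selector)
      else
        pvOptLoopA ocfg scfg row rest processed

def iter_optional_and_static_inputs (step : List (String × List (String × String))) (row : List (String × String)) : List (String × String × String) :=
  let optional_cfg := (PySem.Dict.mk step).getD "inputs_from_csv" []
  let static_cfg := (PySem.Dict.mk step).getD "inputs_static" []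
  pvOptLoopA optional_cfg static_cfg row optional_cfg PySem.Set.empty

-- ===== PORT B =====

def iter_optional_and_static_inputs_alt (step : List (String × List (String × String))) (row : List (String × String)) : List (String × String × String) :=
  let optional_cfg := (PySem.Dict.mk step).getD "inputs_from_csv" []
  let static_cfg := (PySem.Dict.mk step).getD "inputs_static" []
  -- merged = dict.fromkeys(optional_cfg)
  let merged0 : PySem.Dict String (Option (String × String)) :=
    PySem.Dict.mk ((PySem.List.dedup (optional_cfg.map (·.1))).map (fun k => (k, none)))
  -- merged.update({s: (v, "[static]") for s, v in static_cfg.items()})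
  let merged1 := merged0.update ((pvDictItems static_cfg).map (fun p => (p.1, some (p.2, "[static]"))))
  -- merged.update({s: (v, f"{c} -> {v}") for s, c in optional_cfg.items() if (v := row.get(c, "")).strip()})
  let merged2 := merged1.update ((pvDictItems optional_cfg).filterMap (fun p =>
    let v := (PySem.Dict.mk row).getD p.2 ""
    if PySem.Str.strip v == "" then none
    else some (p.1, some (v, p.2 ++ " -> " ++ v))))
  -- final pass: yield the filled entries
  merged2.items.flatMap (fun p => match p.2 with
    | none => []
    | some (v, note) => [(p.1, v, note)])

-- ===== PRECONDITION & SPEC =====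
def Spec_iter_optional_and_static_inputs (step : List (String × List (String × String))) (row : List (String × String)) (out : List (String × String × String)) : Prop := out = iter_optional_and_static_inputs_alt step row
instance (step : List (String × List (String × String))) (row : List (String × String)) (out : List (String × String × String)) : Decidable (Spec_iter_optional_and_static_inputs step row out) := by unfold Spec_iter_optional_and_static_inputs; infer_instance

-- ===== CLAIM (what is proved, stated in full; the proofs are below) =====
def Claim_equal_iter_optional_and_static_inputs : Prop := ∀ (step : List (String × List (String × String))) (row : List (String × String)), Dom_iter_optional_and_static_inputs step row → Spec_iter_optional_and_static_inputs step row (iter_optional_and_static_inputs step row)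

-- ===== LEMMAS AND PROOFS =====

-- what both programs emit for one optional selector
def pvOut1 (ocfg scfg row : List (String × String)) (selector : String) : List (String × String × String) :=
  let column := (PySem.Dict.mk ocfg).getD selector ""
  let value := (PySem.Dict.mk row).getD column ""
  if !(PySem.Str.strip value == "") then
    [(selector, value, column ++ " -> " ++ value)]
  else if (PySem.Dict.mk scfg).contains selector then
    [(selector, (PySem.Dict.mk scfg).getD selector "", "[static]")]
  else []

-- the static-only tail both programs emit
def pvStaticTail (ocfg scfg : List (String × String)) : List (String × String × String) :=
  ((pvDictItems scfg).filter (fun p => !(PySem.Dict.mk ocfg).contains p.1)).map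
    (fun p => (p.1, p.2, "[static]"))

theorem pv_contains_add (P : PySem.Set String) (x k : String) :
    PySem.Set.contains (PySem.Set.add P x) k = (PySem.Set.contains P k || k == x) := by
  simp only [PySem.Set.add, PySem.Set.contains]
  split
  · next h =>
      by_cases hk : k = x
      · subst hk; simp_all
      · simp [hk]
  · next h => by_cases hk : k = x <;> simp [hk]

theorem pv_filter_discard {s : List String} {P : PySem.Set String} {x : String}
    (hx : PySem.Set.contains P x = true) :
    (PySem.Set.discard s x).filter (fun k => !(PySem.Set.contains P k)) =
      s.filter (fun k => !(PySem.Set.contains P k)) := by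
  rw [PySem.Set.discard, List.filter_filter]
  apply List.filter_congr
  intro a _
  by_cases hax : a = x
  · subst hax; simp [(PySem.Set.contains_iff P a).mp hx]
  · simp [hax]

theorem pv_filter_discard_add (s : List String) (P : PySem.Set String) (x : String) :
    (PySem.Set.discard s x).filter (fun k => !(PySem.Set.contains P k)) =
      s.filter (fun k => !(PySem.Set.contains (PySem.Set.add P x) k)) := by
  rw [PySem.Set.discard, List.filter_filter]
  apply List.filter_congr
  intro a _
  rw [pv_contains_add]
  by_cases hax : a = x
  · subst hax; simp
  · by_cases hp : PySem.Set.contains P a = true <;> simp_all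

theorem pv_flatMap_filter_discard {β : Type} (f : String → List β) (q : String → Bool)
    (s : List String) (x : String) (hx : f x = []) :
    ((PySem.Set.discard s x).filter q).flatMap f = (s.filter q).flatMap f := by
  rw [PySem.Set.discard, List.filter_filter]
  induction s with
  | nil => rfl
  | cons a t ih =>
    by_cases hax : a = x
    · subst hax
      by_cases hq : q a = true <;> simp [hq, hx, ih]
    · by_cases hq : q a = true <;> simp [hax, hq, ih]

theorem pvStaticLoopA_eq (ocfg : List (String × String)) (items : List (String × String))
    (P : PySem.Set String) (hP : ∀ k ∈ P, (PySem.Dict.mk ocfg).contains k = true) :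
    pvStaticLoopA ocfg items P =
      (items.filter (fun p => !(PySem.Dict.mk ocfg).contains p.1)).map
        (fun p => (p.1, p.2, "[static]")) := by
  induction items with
  | nil => rfl
  | cons p rest ih =>
    obtain ⟨k, v⟩ := p
    simp only [pvStaticLoopA]
    by_cases ho : (PySem.Dict.mk ocfg).contains k = true
    · have ho' := ho
      simp only [PySem.Dict.contains] at ho'
      simp [ho, ho', ih]
    · have ho' : (ocfg.any fun p => p.1 == k) = false := by
        simp only [PySem.Dict.contains] at ho
        exact Bool.eq_false_iff.mpr ho
      have hpm : k ∉ P := fun h => absurd (hP k h) ho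
      simp [ho, ho', hpm, ih]

theorem pvOptLoopA_eq (ocfg scfg row : List (String × String))
    (pend : List (String × String)) (P : PySem.Set String)
    (hP : ∀ k ∈ P, (PySem.Dict.mk ocfg).contains k = true)
    (hpend : ∀ p ∈ pend, (PySem.Dict.mk ocfg).contains p.1 = true) :
    pvOptLoopA ocfg scfg row pend P =
      ((PySem.List.dedup (pend.map (·.1))).filter
        (fun k => !(PySem.Set.contains P k))).flatMap (pvOut1 ocfg scfg row)
      ++ pvStaticTail ocfg scfg := by
  induction pend generalizing P with
  | nil =>
    simp only [pvOptLoopA, List.map_nil]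
    rw [pvStaticLoopA_eq ocfg _ P hP]
    simp [PySem.List.dedup, PySem.Set.ofList, pvStaticTail]
  | cons p rest ih =>
    obtain ⟨k, cv⟩ := p
    have hko : (PySem.Dict.mk ocfg).contains k = true := hpend (k, cv) (List.mem_cons_self)
    have hrest : ∀ q ∈ rest, (PySem.Dict.mk ocfg).contains q.1 = true :=
      fun q hq => hpend q (List.mem_cons_of_mem _ hq)
    simp only [pvOptLoopA, List.map_cons, PySem.List.dedup_eq_ofList,
      PySem.Set.ofList_cons, List.filter_cons]
    by_cases hPk : PySem.Set.contains P k = true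
    · rw [show PySem.Set.contains P k = true from hPk]
      simp only [Bool.not_true, Bool.false_eq_true, if_true, if_false]
      rw [pv_filter_discard hPk, ← PySem.List.dedup_eq_ofList]
      exact ih P hP hrest
    · have hPkf : PySem.Set.contains P k = false := by
        cases h : PySem.Set.contains P k
        · rfl
        · exact absurd h hPk
      rw [show PySem.Set.contains P k = false from hPkf]
      simp only [Bool.not_false, Bool.false_eq_true, if_true, if_false]
      have hPadd : ∀ x ∈ PySem.Set.add P k, (PySem.Dict.mk ocfg).contains x = true := by
        intro x hx
        rcases (PySem.Set.mem_add P k x).mp hx with h | h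
        · exact hP x h
        · subst h; exact hko
      by_cases hv : pvIsEmptyA ((PySem.Dict.mk row).getD ((PySem.Dict.mk ocfg).getD k "") "") = true
      · rw [if_neg (by simp [hv])]
        by_cases hs : (PySem.Dict.mk scfg).contains k = true
        · rw [if_pos hs]
          have hout : pvOut1 ocfg scfg row k =
              [(k, (PySem.Dict.mk scfg).getD k "", "[static]")] := by
            simp only [pvOut1]
            rw [if_neg (by simpa [pvIsEmptyA] using hv), if_pos hs]
          rw [List.flatMap_cons, hout,
            pv_filter_discard_add _ P k, ← PySem.List.dedup_eq_ofList,
            ih (PySem.Set.add P k) hPadd hrest]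
          simp
        · rw [if_neg hs]
          have hout : pvOut1 ocfg scfg row k = [] := by
            simp only [pvOut1]
            rw [if_neg (by simpa [pvIsEmptyA] using hv), if_neg hs]
          rw [List.flatMap_cons, hout,
            pv_flatMap_filter_discard _ _ _ _ hout, ← PySem.List.dedup_eq_ofList,
            ih P hP hrest]
          simp
      · rw [if_pos (by simp [hv])]
        have hout : pvOut1 ocfg scfg row k =
            [(k, (PySem.Dict.mk row).getD ((PySem.Dict.mk ocfg).getD k "") "",
              (PySem.Dict.mk ocfg).getD k "" ++ " -> " ++
                (PySem.Dict.mk row).getD ((PySem.Dict.mk ocfg).getD k "") "")] := by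
          simp only [pvOut1]
          rw [if_pos (by simpa [pvIsEmptyA] using hv)]
        rw [List.flatMap_cons, hout,
          pv_filter_discard_add _ P k, ← PySem.List.dedup_eq_ofList,
          ih (PySem.Set.add P k) hPadd hrest]
        simp

-- A in canonical form: one emission per distinct optional key, then the static-only tail
theorem pvA_canon (step : List (String × List (String × String))) (row : List (String × String)) :
    iter_optional_and_static_inputs step row =
      (PySem.List.dedup (((PySem.Dict.mk step).getD "inputs_from_csv" []).map (·.1))).flatMap
        (pvOut1 ((PySem.Dict.mk step).getD "inputs_from_csv" [])
          ((PySem.Dict.mk step).getD "inputs_static" []) row)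
      ++ pvStaticTail ((PySem.Dict.mk step).getD "inputs_from_csv" [])
          ((PySem.Dict.mk step).getD "inputs_static" []) := by
  unfold iter_optional_and_static_inputs
  set o := (PySem.Dict.mk step).getD "inputs_from_csv" [] with ho
  rw [pvOptLoopA_eq o _ row o PySem.Set.empty
    (by intro k hk; cases hk)
    (by
      intro p hp
      rw [PySem.Dict.contains_iff_mem_keys, PySem.Dict.keys_mk]
      exact List.mem_map_of_mem hp)]
  congr 1
  have hf : List.filter (fun k => !(PySem.Set.contains PySem.Set.empty k))
      (PySem.List.dedup (o.map (·.1))) = PySem.List.dedup (o.map (·.1)) :=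
    List.filter_eq_self.mpr (fun a _ => rfl)
  rw [hf]

-- ---- B-side lemmas ----

-- `update` with pairwise-distinct keys: old items are overridden in place, new keys append
theorem pv_update_items {ν : Type} (d : PySem.Dict String ν)
    (ps : List (String × ν)) (hnd : (ps.map (·.1)).Nodup) :
    (d.update ps).items =
      d.items.map (fun q => ((PySem.Dict.mk ps).get? q.1).elim q (fun v => (q.1, v)))
      ++ ps.filter (fun p => !(d.contains p.1)) := by
  induction ps generalizing d with
  | nil =>
    simp [PySem.Dict.update, PySem.Dict.get?]
  | cons p rest ih =>
    obtain ⟨k, v⟩ := p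
    simp only [List.map_cons, List.nodup_cons] at hnd
    obtain ⟨hk, hndr⟩ := hnd
    have hkrest : (PySem.Dict.mk rest).get? k = none := by
      rw [PySem.Dict.get?_eq_none_iff_not_mem_keys, PySem.Dict.keys_mk]
      exact hk
    have hupd : d.update ((k, v) :: rest) = (d.insert k v).update rest := rfl
    rw [hupd, ih _ hndr]
    by_cases hc : d.contains k = true
    · rw [PySem.Dict.items_insert_of_contains _ _ hc, List.map_map, List.filter_cons]
      rw [show (!(d.contains k)) = false by simp [hc]]
      simp only [Bool.false_eq_true, if_false]
      congr 1
      · apply List.map_congr_left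
        intro q _
        by_cases hq : q.1 = k
        · simp [Function.comp, hq, hkrest, PySem.Dict.get?_mk_cons]
        · have : (k == q.1) = false := by simp [Ne.symm hq]
          simp [Function.comp, hq, PySem.Dict.get?_mk_cons, this]
      · apply List.filter_congr
        intro q hq
        have hqk : q.1 ≠ k := fun h => hk (h ▸ List.mem_map_of_mem hq)
        rw [PySem.Dict.contains_insert]
        simp [hqk]
    · have hcf : d.contains k = false := by
        cases h : d.contains k
        · rfl
        · exact absurd h hc
      have hnomem : ∀ q ∈ d.items, q.1 ≠ k := by
        intro q hq hqk
        exact hc ((PySem.Dict.contains_iff_mem_keys d k).mpr (hqk ▸ List.mem_map_of_mem hq))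
      rw [PySem.Dict.items_insert_of_not_contains _ _ hcf, List.map_append, List.filter_cons]
      rw [show (!(d.contains k)) = true by simp [hcf]]
      simp only [if_true]
      rw [List.map_singleton]
      have hmapeq : d.items.map (fun q => ((PySem.Dict.mk rest).get? q.1).elim q (fun w => (q.1, w)))
          = d.items.map (fun q => ((PySem.Dict.mk ((k, v) :: rest)).get? q.1).elim q (fun w => (q.1, w))) := by
        apply List.map_congr_left
        intro q hq
        have : (k == q.1) = false := by simp [Ne.symm (hnomem q hq)]
        rw [PySem.Dict.get?_mk_cons, this]
        simp
      have hfiltereq : rest.filter (fun p => !(d.insert k v).contains p.1)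
          = rest.filter (fun p => !(d.contains p.1)) := by
        apply List.filter_congr
        intro q hq
        have hqk : q.1 ≠ k := fun h => hk (h ▸ List.mem_map_of_mem hq)
        rw [PySem.Dict.contains_insert]
        simp [hqk]
      rw [hmapeq, hfiltereq, List.append_assoc, List.singleton_append]
      simp [hkrest]

-- first-match lookup in a dict built from element-keyed pairs over a nodup key list
theorem pv_get?_mk_keyed {ν : Type} (g : String → Option (String × ν))
    (hg : ∀ x p, g x = some p → p.1 = x) (ks : List String) (hnd : ks.Nodup) (k : String) :
    (PySem.Dict.mk (ks.filterMap g)).get? k =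
      if k ∈ ks then (g k).map (·.2) else none := by
  induction ks with
  | nil => simp [PySem.Dict.get?]
  | cons a t ih =>
    simp only [List.nodup_cons] at hnd
    obtain ⟨hat, hndt⟩ := hnd
    rw [List.filterMap_cons]
    cases hga : g a with
    | none =>
      rw [ih hndt]
      by_cases hk : k = a
      · subst hk
        simp [hat, hga]
      · simp [hk]
    | some p =>
      obtain ⟨pk, pv⟩ := p
      have hpk : pk = a := hg a (pk, pv) hga
      subst hpk
      rw [PySem.Dict.get?_mk_cons, ih hndt]
      by_cases hk : k = pk
      · subst hk
        simp [hat, hga]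
      · have : (pk == k) = false := by simp [Ne.symm hk]
        simp [this, hk]

-- dict keys built from an assoc list coincide with first-occurrence key dedup
theorem pv_contains_iff_dedup (l : List (String × String)) (k : String) :
    (PySem.Dict.mk l).contains k = true ↔ k ∈ PySem.List.dedup (l.map (·.1)) := by
  rw [PySem.Dict.contains_iff_mem_keys, PySem.Dict.keys_mk, PySem.List.mem_dedup]

-- the placeholder dict `dict.fromkeys(optional_cfg)` contains exactly the optional keys
theorem pv_m0_contains (o : List (String × String)) (k : String) :
    (PySem.Dict.mk ((PySem.List.dedup (o.map (·.1))).map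
      (fun k => (k, (none : Option (String × String)))))).contains k
      = (PySem.Dict.mk o).contains k := by
  rw [PySem.Dict.contains_eq_decide_mem_keys, PySem.Dict.contains_eq_decide_mem_keys,
    PySem.Dict.keys_mk, PySem.Dict.keys_mk, List.map_map]
  simp

-- keys of a dict built from element-keyed optional pairs
theorem pv_keys_filterMap_keyed {ν : Type} (g : String → Option (String × ν))
    (hg : ∀ x p, g x = some p → p.1 = x) (ks : List String) :
    (ks.filterMap g).map (·.1) = ks.filter (fun x => (g x).isSome) := by
  induction ks with
  | nil => rfl
  | cons a t ih =>
    rw [List.filterMap_cons, List.filter_cons]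
    cases hga : g a with
    | none => simp [ih]
    | some p => simp [hg a p hga, ih]

-- first-match lookup in a dict built by mapping a value function over a nodup key list
theorem pv_get?_mk_mapped {ν : Type} (f : String → ν) (ks : List String) (hnd : ks.Nodup)
    (k : String) :
    (PySem.Dict.mk (ks.map (fun x => (x, f x)))).get? k =
      if k ∈ ks then some (f k) else none := by
  have h : ks.map (fun x => (x, f x)) = ks.filterMap (fun x => some (x, f x)) := by
    induction ks with
    | nil => rfl
    | cons a t ih => simp
  rw [h, pv_get?_mk_keyed (fun x => some (x, f x)) (by intro x p hp; cases hp; rfl) ks hnd k]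
  split <;> rfl

-- the value the static layer stores for a key / the value the CSV layer stores (or skips)
def pvFS (s : List (String × String)) (k : String) : Option (String × String) :=
  some ((PySem.Dict.mk s).getD k "", "[static]")

def pvGC (o row : List (String × String)) (k : String) :
    Option (String × Option (String × String)) :=
  let c := (PySem.Dict.mk o).getD k ""
  let v := (PySem.Dict.mk row).getD c ""
  if PySem.Str.strip v == "" then none else some (k, some (v, c ++ " -> " ++ v))

theorem pvGC_key (o row : List (String × String)) :
    ∀ x p, pvGC o row x = some p → p.1 = x := by
  intro x p hp
  rw [pvGC] at hp
  by_cases h : PySem.Str.strip ((PySem.Dict.mk row).getD ((PySem.Dict.mk o).getD x "") "") == ""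
  · simp [h] at hp
  · simp [h] at hp
    subst hp
    rfl

-- B's overlay, in canonical form (core statement on the two cfg lists)
theorem pvB_core (o s row : List (String × String)) :
    (((PySem.Dict.mk ((PySem.List.dedup (o.map (·.1))).map
          (fun k => (k, (none : Option (String × String)))))).update
        ((pvDictItems s).map (fun p => (p.1, some (p.2, "[static]"))))).update
        ((pvDictItems o).filterMap (fun p =>
          let v := (PySem.Dict.mk row).getD p.2 ""
          if PySem.Str.strip v == "" then none
          else some (p.1, some (v, p.2 ++ " -> " ++ v))))).items.flatMap
      (fun p => match p.2 with | none => [] | some (v, note) => [(p.1, v, note)])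
    = (PySem.List.dedup (o.map (·.1))).flatMap (pvOut1 o s row) ++ pvStaticTail o s := by
  set oK := PySem.List.dedup (o.map (·.1)) with hoK
  set sK := PySem.List.dedup (s.map (·.1)) with hsK
  have hndO : oK.Nodup := PySem.List.nodup_dedup _
  have hndS : sK.Nodup := PySem.List.nodup_dedup _
  have hstat : (pvDictItems s).map (fun p => (p.1, some (p.2, "[static]"))) =
      sK.map (fun k => (k, pvFS s k)) := by
    rw [pvDictItems, List.map_map]
    apply List.map_congr_left
    intro k _
    rfl
  have hcsv : (pvDictItems o).filterMap (fun p =>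
      let v := (PySem.Dict.mk row).getD p.2 ""
      if PySem.Str.strip v == "" then none
      else some (p.1, some (v, p.2 ++ " -> " ++ v))) = oK.filterMap (pvGC o row) := by
    rw [pvDictItems, List.filterMap_map]
    apply List.filterMap_congr
    intro k _
    rfl
  rw [hstat, hcsv]
  set m0 : PySem.Dict String (Option (String × String)) :=
    PySem.Dict.mk (oK.map (fun k => (k, none))) with hm0
  -- the static layer
  have hndStat : ((sK.map (fun k => (k, pvFS s k))).map (·.1)).Nodup := by
    have hid : ((·.1) ∘ fun k => (k, pvFS s k)) = (id : String → String) := rfl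
    rw [List.map_map, hid, List.map_id]
    exact hndS
  have hm1 : (m0.update (sK.map (fun k => (k, pvFS s k)))).items =
      oK.map (fun k => (k, if (PySem.Dict.mk s).contains k then pvFS s k else none))
      ++ (sK.filter (fun k => !(PySem.Dict.mk o).contains k)).map (fun k => (k, pvFS s k)) := by
    rw [pv_update_items _ _ hndStat]
    congr 1
    · have hm0items : m0.items = oK.map (fun k => (k, (none : Option (String × String)))) := rfl
      rw [hm0items, List.map_map]
      apply List.map_congr_left
      intro k _
      simp only [Function.comp_apply]
      rw [pv_get?_mk_mapped (pvFS s) sK hndS k]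
      by_cases hks : k ∈ sK
      · rw [if_pos hks,
          show ((PySem.Dict.mk s).contains k) = true from (pv_contains_iff_dedup s k).mpr hks]
        rfl
      · have hcf : (PySem.Dict.mk s).contains k = false := by
          cases h : (PySem.Dict.mk s).contains k
          · rfl
          · exact absurd ((pv_contains_iff_dedup s k).mp h) hks
        rw [if_neg hks, hcf]
        rfl
    · rw [List.filter_map]
      apply congrArg
      apply List.filter_congr
      intro k _
      rw [show ((fun p => !m0.contains p.1) ∘ fun k => (k, pvFS s k)) k = !m0.contains k from rfl,
        hm0, pv_m0_contains]
  -- the CSV layer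
  have hndCsv : ((oK.filterMap (pvGC o row)).map (·.1)).Nodup := by
    rw [pv_keys_filterMap_keyed (pvGC o row) (pvGC_key o row)]
    exact hndO.filter _
  have hkeysCsv : ∀ p ∈ oK.filterMap (pvGC o row), p.1 ∈ oK := by
    intro p hp
    have h1 : p.1 ∈ (oK.filterMap (pvGC o row)).map (·.1) := List.mem_map_of_mem hp
    rw [pv_keys_filterMap_keyed (pvGC o row) (pvGC_key o row)] at h1
    exact List.mem_of_mem_filter h1
  have hm2 : ((m0.update (sK.map (fun k => (k, pvFS s k)))).update (oK.filterMap (pvGC o row))).items =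
      oK.map (fun k => (k,
        ((pvGC o row k).map (·.2)).getD (if (PySem.Dict.mk s).contains k then pvFS s k else none)))
      ++ (sK.filter (fun k => !(PySem.Dict.mk o).contains k)).map (fun k => (k, pvFS s k)) := by
    rw [pv_update_items _ _ hndCsv, hm1]
    have hfilnil : (oK.filterMap (pvGC o row)).filter
        (fun p => !(m0.update (sK.map (fun k => (k, pvFS s k)))).contains p.1) = [] := by
      apply List.filter_eq_nil_iff.mpr
      intro p hp
      have hc : (m0.update (sK.map (fun k => (k, pvFS s k)))).contains p.1 = true := by
        rw [PySem.Dict.contains_iff_mem_keys]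
        show p.1 ∈ ((m0.update (sK.map (fun k => (k, pvFS s k)))).items).map (·.1)
        rw [hm1, List.map_append, List.map_map]
        apply List.mem_append_left
        exact List.mem_map_of_mem (hkeysCsv p hp)
      simp [hc]
    rw [hfilnil, List.append_nil, List.map_append, List.map_map, List.map_map]
    congr 1
    · apply List.map_congr_left
      intro k hk
      simp only [Function.comp_apply]
      rw [pv_get?_mk_keyed (pvGC o row) (pvGC_key o row) oK hndO k, if_pos hk]
      cases hgck : pvGC o row k with
      | none => rfl
      | some p =>
        have hpk := pvGC_key o row k p hgck
        cases p with
        | mk pk pv => simp_all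
    · apply List.map_congr_left
      intro k hk
      have hko : k ∉ oK := by
        have hcf := List.of_mem_filter hk
        intro hmem
        rw [show ((PySem.Dict.mk o).contains k) = true from (pv_contains_iff_dedup o k).mpr hmem]
          at hcf
        simp at hcf
      simp only [Function.comp_apply]
      rw [pv_get?_mk_keyed (pvGC o row) (pvGC_key o row) oK hndO k, if_neg hko]
      rfl
  -- assemble
  rw [hm2, List.flatMap_append]
  congr 1
  · rw [List.flatMap_map]
    apply List.flatMap_congr
    intro k _
    by_cases hv : PySem.Str.strip ((PySem.Dict.mk row).getD ((PySem.Dict.mk o).getD k "") "") == ""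
    · have hg : pvGC o row k = none := by
        rw [pvGC]
        simp [hv]
      cases hs : (PySem.Dict.mk s).contains k with
      | true => simp [hg, hs, pvOut1, pvFS, hv]
      | false => simp [hg, hs, pvOut1, hv]
    · have hg : pvGC o row k = some (k,
          some ((PySem.Dict.mk row).getD ((PySem.Dict.mk o).getD k "") "",
            (PySem.Dict.mk o).getD k "" ++ " -> " ++
              (PySem.Dict.mk row).getD ((PySem.Dict.mk o).getD k "") "")) := by
        rw [pvGC]
        simp [hv]
      simp [hg, pvOut1, hv]
  · rw [pvStaticTail, pvDictItems, List.filter_map, List.flatMap_map, List.map_map,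
      List.map_eq_flatMap]
    apply List.flatMap_congr
    intro k _
    rfl

-- B in the same canonical form
theorem pvB_canon (step : List (String × List (String × String))) (row : List (String × String)) :
    iter_optional_and_static_inputs_alt step row =
      (PySem.List.dedup (((PySem.Dict.mk step).getD "inputs_from_csv" []).map (·.1))).flatMap
        (pvOut1 ((PySem.Dict.mk step).getD "inputs_from_csv" [])
          ((PySem.Dict.mk step).getD "inputs_static" []) row)
      ++ pvStaticTail ((PySem.Dict.mk step).getD "inputs_from_csv" [])
          ((PySem.Dict.mk step).getD "inputs_static" []) := by
  simp only [iter_optional_and_static_inputs_alt]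
  exact pvB_core _ _ row

theorem pv_main (step : List (String × List (String × String))) (row : List (String × String)) :
    iter_optional_and_static_inputs step row = iter_optional_and_static_inputs_alt step row := by
  rw [pvA_canon, pvB_canon]

-- ===== VERDICT (by name: the statement is the Claim_ definition above) =====
theorem iter_optional_and_static_inputs_spec : Claim_equal_iter_optional_and_static_inputs := by
  intro step row _
  exact pv_main step row
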